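-- pv_equiv track=rewrite | github.com/Pavelbek/pylearn | end_to_start.py | check
-- ===== SOURCE A (Python) =====
-- def check(words_set):
--     for word in words_set:
--         for end_w in words_set:
--             if end_w == word:
--                 continue
--             elif word.endswith(end_w):
--                 return True
--     return False
-- ===== SOURCE B (Python) =====
-- def check(words_set):
--     seen = set(words_set)
--     for word in words_set:
--         for i in range(1, len(word) + 1):
--             if word[i:] in seen:
--                 return True
--     return False
-- ===== Notes on version B (the rewrite author's own statement) =====
-- stated objective: alternative
-- what changed: Replaces the nested scan over all word pairs by a set of the words built once plus an enumeration of each word's proper suffixes looked up in that set.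
import Mathlib
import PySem

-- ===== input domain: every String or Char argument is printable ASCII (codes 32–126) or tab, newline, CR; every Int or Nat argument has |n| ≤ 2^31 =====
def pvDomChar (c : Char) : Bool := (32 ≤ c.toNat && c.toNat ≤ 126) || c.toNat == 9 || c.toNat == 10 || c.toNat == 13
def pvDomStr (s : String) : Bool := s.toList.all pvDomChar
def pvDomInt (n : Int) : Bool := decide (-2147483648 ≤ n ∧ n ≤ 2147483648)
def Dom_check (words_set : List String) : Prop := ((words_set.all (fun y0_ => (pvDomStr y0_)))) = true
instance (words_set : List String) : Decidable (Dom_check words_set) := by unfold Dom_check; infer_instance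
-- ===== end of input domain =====

-- B replaces A's nested scan over all word pairs by a set of the words built once plus an enumeration of each word's proper suffixes looked up in that set (objective: alternative algorithm).

-- ===== PORT A =====
def check (words_set : List String) : Bool :=
  words_set.any (fun word =>
    words_set.any (fun end_w =>
      if end_w == word then false
      else PySem.Str.endswith word end_w))

-- ===== PORT B =====
def check_alt (words_set : List String) : Bool :=
  let seen : PySem.Set String := PySem.Set.ofList words_set
  words_set.any (fun word =>
    (PySem.List.pyRange 1 ((PySem.Str.len word : Int) + 1) 1).any (fun i =>
      PySem.Set.contains seen (PySem.Str.slice word (some i) none)))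

-- ===== PRECONDITION & SPEC =====
def Spec_check (words_set : List String) (out : Bool) : Prop := out = check_alt words_set
instance (words_set : List String) (out : Bool) : Decidable (Spec_check words_set out) := by unfold Spec_check; infer_instance

-- ===== CLAIM (what is proved, stated in full; the proofs are below) =====
def Claim_equal_check : Prop := ∀ (words_set : List String), Dom_check words_set → Spec_check words_set (check words_set)

-- ===== LEMMAS AND PROOFS =====

theorem toList_injective : Function.Injective String.toList := by
  intro a b h
  have := congrArg String.ofList h
  simpa using this

-- w[i:] for 0 ≤ i is the drop of the character list
theorem slice_from_eq_ofList_drop (w : String) (i : Int) (hi : 0 ≤ i) :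
    PySem.Str.slice w (some i) none = String.ofList (w.toList.drop i.toNat) := by
  simp [PySem.Str.slice, PySem.List.slice_from (xs := w.toList) (a := i) hi]

-- "some other word of ws is a suffix of some word" (A) ⟺ "some proper suffix of some word is in ws" (B)
theorem check_eq_check_alt (ws : List String) : check ws = check_alt ws := by
  rw [Bool.eq_iff_iff]
  simp only [check, check_alt, List.any_eq_true, PySem.List.mem_pyRange_one,
    PySem.Set.contains_eq_listContains, List.contains_iff_mem, PySem.Set.mem_ofList,
    PySem.Str.endswith_eq, beq_iff_eq]
  constructor
  · rintro ⟨w, hw, e, he, hif⟩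
    by_cases hew : e = w
    · simp [hew] at hif
    · rw [if_neg hew, PySem.Chars.endswith_iff] at hif
      have hlt : e.toList.length < w.toList.length := by
        rcases Nat.lt_or_ge e.toList.length w.toList.length with h | h
        · exact h
        · exact absurd (toList_injective (List.IsSuffix.eq_of_length_le hif h)) hew
      refine ⟨w, hw, ((w.toList.length - e.toList.length : Nat) : Int), ⟨?_, ?_⟩, ?_⟩
      · omega
      · simp only [PySem.Str.len_eq]; omega
      · rw [slice_from_eq_ofList_drop _ _ (by positivity)]
        obtain ⟨t, ht⟩ := hif
        have : w.toList.drop (((w.toList.length - e.toList.length : Nat) : Int)).toNat = e.toList := by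
          rw [← ht]; simp
        rw [this]
        simpa using he
  · rintro ⟨w, hw, i, ⟨h1, h2⟩, hmem⟩
    rw [slice_from_eq_ofList_drop _ _ (by omega)] at hmem
    refine ⟨w, hw, _, hmem, ?_⟩
    have hlen : (String.ofList (w.toList.drop i.toNat)).toList.length < w.toList.length := by
      simp only [String.toList_ofList, List.length_drop]
      simp only [PySem.Str.len_eq] at h2
      omega
    rw [if_neg (fun h => by rw [h] at hlen; omega)]
    rw [PySem.Chars.endswith_iff]
    simpa using List.drop_suffix i.toNat w.toList

-- ===== VERDICT (by name: the statement is the Claim_ definition above) =====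
theorem check_spec : Claim_equal_check := by
  intro ws _
  exact check_eq_check_alt ws
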